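-- pv_equiv track=rewrite | github.com/kartaview/upload-scripts | parsers/xmp.py | compute_camera_items
-- ===== SOURCE A (Python) =====
-- from typing import Optional, Tuple, List, Any, Type
--
-- def compute_camera_items(xml_tags) -> Tuple[Optional[int], Optional[int], Optional[str]]:
--     full_pano_image_width, cropped_area_image_width_pixels, projection = (None, None, None)
--     for attr_name, attr_value in xml_tags.items():
--         if "FullPanoWidthPixels" in attr_name:
--             full_pano_image_width = int(attr_value)
--         if "CroppedAreaImageWidthPixels" in attr_name:
--             cropped_area_image_width_pixels = int(attr_value)
--         if "ProjectionType" in attr_name: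
--             projection = attr_value
--
--     return full_pano_image_width, cropped_area_image_width_pixels, projection
-- ===== SOURCE B (Python) =====
-- def _last_match(xml_tags, name):
--     found = None
--     for attr_name, attr_value in xml_tags.items():
--         if name in attr_name:
--             found = attr_value
--     return found
--
--
-- def compute_camera_items(xml_tags):
--     full_pano = _last_match(xml_tags, "FullPanoWidthPixels")
--     cropped = _last_match(xml_tags, "CroppedAreaImageWidthPixels")
--     projection = _last_match(xml_tags, "ProjectionType")
--     return (int(full_pano) if full_pano is not None else None,
--             int(cropped) if cropped is not None else None,
--             projection)
-- ===== Notes on version B (the rewrite author's own statement) =====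
-- stated objective: simpler
-- what changed: B replaces A's single fused scan carrying three mutable slots by a tiny last-match helper called once per field, converting to int only the final match instead of every match.
import Mathlib
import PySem

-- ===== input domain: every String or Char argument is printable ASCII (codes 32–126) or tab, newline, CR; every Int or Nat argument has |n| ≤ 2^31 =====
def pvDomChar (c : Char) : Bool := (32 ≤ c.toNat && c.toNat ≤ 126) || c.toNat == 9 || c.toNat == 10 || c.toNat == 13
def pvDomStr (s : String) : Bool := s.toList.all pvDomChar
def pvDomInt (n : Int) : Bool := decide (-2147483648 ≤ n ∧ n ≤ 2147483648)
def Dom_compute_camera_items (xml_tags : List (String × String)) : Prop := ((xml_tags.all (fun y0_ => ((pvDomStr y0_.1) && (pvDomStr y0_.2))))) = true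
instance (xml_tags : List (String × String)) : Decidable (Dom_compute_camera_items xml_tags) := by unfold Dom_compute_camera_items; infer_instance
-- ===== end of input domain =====

-- B replaces A's fused three-slot scan with one last-match helper called per field; objective: simpler.
-- ===== PORT A =====
def compute_camera_items (xml_tags : List (String × String)) : Option Int × Option Int × Option String :=
  xml_tags.foldl
    (fun (st : Option Int × Option Int × Option String) p =>
      let st := if PySem.Str.isIn "FullPanoWidthPixels" p.1 then (PySem.Int.ofStr? p.2, st.2.1, st.2.2) else st
      let st := if PySem.Str.isIn "CroppedAreaImageWidthPixels" p.1 then (st.1, PySem.Int.ofStr? p.2, st.2.2) else st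
      let st := if PySem.Str.isIn "ProjectionType" p.1 then (st.1, st.2.1, some p.2) else st
      st)
    (none, none, none)

-- ===== PORT B =====
def lastMatch (xml_tags : List (String × String)) (name : String) : Option String :=
  xml_tags.foldl (fun found p => if PySem.Str.isIn name p.1 then some p.2 else found) none

def compute_camera_items_alt (xml_tags : List (String × String)) : Option Int × Option Int × Option String :=
  ((lastMatch xml_tags "FullPanoWidthPixels").bind PySem.Int.ofStr?,
   (lastMatch xml_tags "CroppedAreaImageWidthPixels").bind PySem.Int.ofStr?,
   lastMatch xml_tags "ProjectionType")

-- ===== PRECONDITION & SPEC =====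
-- Pre_ excludes exactly the inputs on which Python A raises ValueError: a tag whose name
-- contains one of the two integer fields but whose value int() cannot parse.
def Pre_compute_camera_items (xml_tags : List (String × String)) : Prop :=
  (xml_tags.all (fun p =>
    !(PySem.Str.isIn "FullPanoWidthPixels" p.1 || PySem.Str.isIn "CroppedAreaImageWidthPixels" p.1)
      || (PySem.Int.ofStr? p.2).isSome)) = true

instance (xml_tags : List (String × String)) : Decidable (Pre_compute_camera_items xml_tags) := by
  unfold Pre_compute_camera_items; infer_instance

def pvWitness_compute_camera_items : (List (String × String)) :=
  [("GPano:FullPanoWidthPixels", "5760"), ("GPano:ProjectionType", "equirectangular")]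

def Spec_compute_camera_items (xml_tags : List (String × String)) (out : Option Int × Option Int × Option String) : Prop := out = compute_camera_items_alt xml_tags
instance (xml_tags : List (String × String)) (out : Option Int × Option Int × Option String) : Decidable (Spec_compute_camera_items xml_tags out) := by unfold Spec_compute_camera_items; infer_instance

-- ===== CLAIM (what is proved, stated in full; the proofs are below) =====
def Claim_equal_compute_camera_items : Prop := ∀ (xml_tags : List (String × String)), Dom_compute_camera_items xml_tags → Pre_compute_camera_items xml_tags → Spec_compute_camera_items xml_tags (compute_camera_items xml_tags)

-- ===== LEMMAS AND PROOFS =====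

-- A's fold splits into three independent per-field folds.
theorem foldA_split (xml_tags : List (String × String)) (st : Option Int × Option Int × Option String) :
    xml_tags.foldl
      (fun (st : Option Int × Option Int × Option String) p =>
        let st := if PySem.Str.isIn "FullPanoWidthPixels" p.1 then (PySem.Int.ofStr? p.2, st.2.1, st.2.2) else st
        let st := if PySem.Str.isIn "CroppedAreaImageWidthPixels" p.1 then (st.1, PySem.Int.ofStr? p.2, st.2.2) else st
        let st := if PySem.Str.isIn "ProjectionType" p.1 then (st.1, st.2.1, some p.2) else st
        st) st
    = (xml_tags.foldl (fun a p => if PySem.Str.isIn "FullPanoWidthPixels" p.1 then PySem.Int.ofStr? p.2 else a) st.1,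
       xml_tags.foldl (fun a p => if PySem.Str.isIn "CroppedAreaImageWidthPixels" p.1 then PySem.Int.ofStr? p.2 else a) st.2.1,
       xml_tags.foldl (fun a p => if PySem.Str.isIn "ProjectionType" p.1 then some p.2 else a) st.2.2) := by
  induction xml_tags generalizing st with
  | nil => rfl
  | cons hd tl ih =>
    simp only [List.foldl_cons]
    rw [ih]
    split_ifs <;> rfl

-- storing int(v) at each match = taking the last match and parsing it once.
theorem fold_bind (name : String) (xml_tags : List (String × String)) (o : Option String) :
    xml_tags.foldl (fun a p => if PySem.Str.isIn name p.1 then PySem.Int.ofStr? p.2 else a) (o.bind PySem.Int.ofStr?)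
    = (xml_tags.foldl (fun a p => if PySem.Str.isIn name p.1 then some p.2 else a) o).bind PySem.Int.ofStr? := by
  induction xml_tags generalizing o with
  | nil => rfl
  | cons hd tl ih =>
    simp only [List.foldl_cons]
    by_cases h : PySem.Str.isIn name hd.1
    · simp only [h, if_true]
      rw [← ih (some hd.2)]; rfl
    · simp only [h, if_false]
      exact ih o

-- ===== VERDICT (by name: the statement is the Claim_ definition above) =====
theorem compute_camera_items_spec : Claim_equal_compute_camera_items := by
  intro xml_tags _ _
  show compute_camera_items xml_tags = compute_camera_items_alt xml_tags
  unfold compute_camera_items compute_camera_items_alt lastMatch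
  rw [foldA_split]
  exact congrArg₂ _ (fold_bind _ _ none) (congrArg₂ _ (fold_bind _ _ none) rfl)
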